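-- pv_equiv track=rewrite | github.com/jcntrl/ProjectEuler100 | 0025_1000-digit_Fibonacci_number.py | fibmdigits
-- ===== SOURCE A (Python) =====
-- def fibmdigits(m): #m == num of digits
--     memo = {0:0, 1:1}
--     def fibfast(n, memo): #verified working
--         if n not in memo:
--             memo[n] = fibfast(n-2, memo) + fibfast(n-1, memo)
--         return memo[n]
--     fnum = 0
--     flen = 1
--     while flen < 10**(m-1) + 1:
--         fnum += 1
--         flen = fibfast(fnum, memo)
--     return flen, fnum
-- ===== SOURCE B (Python) =====
-- def fibmdigits(m):  # m == num of digits
--     t = 10 ** (m - 1) + 1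
--     def fib_pair(n):  # fast doubling: returns (F(n), F(n+1))
--         if n == 0:
--             return (0, 1)
--         a, b = fib_pair(n >> 1)
--         c = a * (2 * b - a)
--         d = a * a + b * b
--         return (d, c + d) if n & 1 else (c, d)
--     # F(5*m) >= 10**(m-1) + 1 for m >= 1, so the answer index lies in (0, 5*m]
--     lo, hi = 0, 5 * m
--     while lo + 1 < hi:  # invariant: F(lo) < t <= F(hi)
--         mid = (lo + hi) // 2
--         if fib_pair(mid)[0] < t:
--             lo = mid
--         else:
--             hi = mid
--     return fib_pair(hi)[0], hi
-- ===== Notes on version B (the rewrite author's own statement) =====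
-- stated objective: faster
-- what changed: Replaced the linear scan that computes every Fibonacci number up to the answer (memoized recursion, ~4.8m big-int additions) by fast-doubling Fibonacci evaluation combined with a binary search for the smallest index n with F(n) >= 10**(m-1)+1 inside the proven bound n <= 5*m.
-- outside the precondition, e.g. on fibmdigits(0): A returns (2, 3), B returns (0, 0); on fibmdigits(-15): A returns (1, 0), B raises RecursionError
import Mathlib
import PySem

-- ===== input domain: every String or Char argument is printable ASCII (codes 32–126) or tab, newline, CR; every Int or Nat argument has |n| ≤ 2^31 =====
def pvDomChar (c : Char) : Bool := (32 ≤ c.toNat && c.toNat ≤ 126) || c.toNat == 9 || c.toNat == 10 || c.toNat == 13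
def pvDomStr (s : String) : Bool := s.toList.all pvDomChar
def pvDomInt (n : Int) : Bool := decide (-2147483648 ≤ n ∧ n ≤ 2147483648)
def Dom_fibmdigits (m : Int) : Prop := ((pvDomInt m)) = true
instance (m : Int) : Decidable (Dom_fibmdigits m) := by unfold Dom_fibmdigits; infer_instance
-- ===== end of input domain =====

-- B replaces A's linear scan through all Fibonacci numbers by fast-doubling + binary search (faster).

-- ===== PORT A =====
-- A's inner `fibfast(n, memo)`: the Python mutates `memo`; the port threads it through.
-- `fuel` only makes the recursion total; the fuel supplied below always exceeds the real depth.
def fibfastA : Nat → Int → PySem.Dict Int Int → Int × PySem.Dict Int Int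
  | 0, n, memo => (memo.getD n 0, memo)  -- fuel exhausted: unreachable at the supplied fuel
  | fuel + 1, n, memo =>
    match memo.get? n with
    | some v => (v, memo)                -- `return memo[n]`
    | none =>
      let r1 := fibfastA fuel (n - 2) memo
      let r2 := fibfastA fuel (n - 1) r1.2
      let memo' := r2.2.insert n (r1.1 + r2.1)   -- memo[n] = fibfast(n-2) + fibfast(n-1)
      (r1.1 + r2.1, memo')                       -- `return memo[n]` right after the store

-- A's while loop; `fuel` only makes it total (the loop exits within 5*m iterations, proved below).
def loopA : Nat → Int → Int → Int → PySem.Dict Int Int → Int × Int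
  | 0, _, fnum, flen, _ => (flen, fnum)
  | fuel + 1, t, fnum, flen, memo =>
    if flen < t then
      let fnum' := fnum + 1
      let r := fibfastA (fnum'.toNat + 2) fnum' memo
      loopA fuel t fnum' r.1 r.2
    else (flen, fnum)

-- threshold 10**(m-1)+1: exact for m ≥ 1 (Pre_); for m ≤ 0 Python computes it in floats, excluded by Pre_
def fibmdigits (m : Int) : Int × Int :=
  loopA (6 * m.toNat + 10) (10 ^ (m - 1).toNat + 1) 0 1 (PySem.Dict.ofList [(0, 0), (1, 1)])

-- ===== PORT B =====
-- fast doubling: fib_pair(n) = (F(n), F(n+1));  n >> 1 is n / 2, n & 1 is n % 2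
def fibPairB (n : Nat) : Int × Int :=
  if h : n = 0 then (0, 1)
  else
    let p := fibPairB (n / 2)
    let c := p.1 * (2 * p.2 - p.1)
    let d := p.1 * p.1 + p.2 * p.2
    if n % 2 = 1 then (d, c + d) else (c, d)
termination_by n
decreasing_by exact Nat.div_lt_self (Nat.pos_of_ne_zero h) one_lt_two

-- B's `while lo + 1 < hi` binary search; `fuel` only makes it total (hi - lo shrinks each step)
def bsearchB : Nat → Int → Nat → Nat → Nat
  | 0, _, _, hi => hi
  | fuel + 1, t, lo, hi =>
    if lo + 1 < hi then
      let mid := (lo + hi) / 2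
      if (fibPairB mid).1 < t then bsearchB fuel t mid hi else bsearchB fuel t lo mid
    else hi

def fibmdigits_alt (m : Int) : Int × Int :=
  let t : Int := 10 ^ (m - 1).toNat + 1
  let hi := 5 * m.toNat
  let n := bsearchB hi t 0 hi
  ((fibPairB n).1, (n : Int))

-- ===== PRECONDITION & SPEC =====
-- Pre_ excludes m ≤ 0, where m is not a meaningful digit count and A's loop threshold 10**(m-1)
-- is a float (for m ≤ -15 it rounds away entirely and A returns the pre-loop state (1, 0));
-- B's recursion does not terminate for m < 0, so those inputs are excluded rather than matched.
def Pre_fibmdigits (m : Int) : Prop := 1 ≤ m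
instance (m : Int) : Decidable (Pre_fibmdigits m) := by unfold Pre_fibmdigits; infer_instance
def pvWitness_fibmdigits : Int := (3)

def Spec_fibmdigits (m : Int) (out : Int × Int) : Prop := out = fibmdigits_alt m
instance (m : Int) (out : Int × Int) : Decidable (Spec_fibmdigits m out) := by unfold Spec_fibmdigits; infer_instance

-- ===== CLAIM (what is proved, stated in full; the proofs are below) =====
def Claim_equal_fibmdigits : Prop := ∀ (m : Int), Dom_fibmdigits m → Pre_fibmdigits m → Spec_fibmdigits m (fibmdigits m)

-- ===== LEMMAS AND PROOFS =====

-- The memo after A has filled indices 0..k (k >= 1): keys appended in insertion order.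
def memoD : Nat → PySem.Dict Int Int
  | 0 => PySem.Dict.ofList [((0 : Int), (0 : Int))]
  | k + 1 => (memoD k).insert ((k : Int) + 1) ((Nat.fib (k + 1) : Nat) : Int)

theorem memoD_get?_le (k i : Nat) (h : i ≤ k) :
    (memoD k).get? (i : Int) = some ((Nat.fib i : Nat) : Int) := by
  induction k with
  | zero =>
    interval_cases i
    decide
  | succ k ih =>
    rw [memoD, PySem.Dict.get?_insert]
    rcases Nat.lt_or_ge i (k + 1) with hi | hi
    · rw [if_neg (by omega), ih (by omega)]
    · have : i = k + 1 := by omega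
      subst this
      rw [if_pos (by push_cast; ring)]

theorem memoD_get?_gt (k : Nat) (j : Int) (h : (k : Int) < j) :
    (memoD k).get? j = none := by
  induction k with
  | zero =>
    have h0 : memoD 0 = PySem.Dict.mk [((0 : Int), (0 : Int))] := by decide
    rw [h0, PySem.Dict.get?_mk_cons, if_neg (by simpa using by omega : ¬ ((0:Int) == j) = true)]
    simp [PySem.Dict.get?]
  | succ k ih =>
    rw [memoD, PySem.Dict.get?_insert, if_neg (by omega)]
    exact ih (by omega)
theorem fibfastA_step (k : Nat) (hk : 1 ≤ k) (fuel : Nat) :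
    fibfastA (fuel + 2) ((k : Int) + 1) (memoD k)
      = (((Nat.fib (k + 1) : Nat) : Int), memoD (k + 1)) := by
  have hnone : (memoD k).get? ((k : Int) + 1) = none := memoD_get?_gt k _ (by omega)
  have h2 : ((k : Int) + 1) - 2 = ((k - 1 : Nat) : Int) := by omega
  have h1 : ((k : Int) + 1) - 1 = ((k : Nat) : Int) := by omega
  have g2 : (memoD k).get? ((k - 1 : Nat) : Int) = some ((Nat.fib (k-1) : Nat) : Int) :=
    memoD_get?_le k (k-1) (by omega)
  have g1 : (memoD k).get? ((k : Nat) : Int) = some ((Nat.fib k : Nat) : Int) :=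
    memoD_get?_le k k le_rfl
  rw [fibfastA, hnone]
  simp only [h2, h1, fibfastA, g2, g1]
  have hfib : Nat.fib (k + 1) = Nat.fib (k - 1) + Nat.fib k := by
    have := Nat.fib_add_two (n := k - 1)
    have e1 : k - 1 + 2 = k + 1 := by omega
    have e2 : k - 1 + 1 = k := by omega
    rw [e1, e2] at this
    exact this
  rw [memoD]
  have hv : ((Nat.fib (k - 1) : Nat) : Int) + ((Nat.fib k : Nat) : Int) = ((Nat.fib (k + 1) : Nat) : Int) := by
    push_cast [hfib]; ring
  rw [hv]
theorem fib_ratio (n : Nat) (h : 2 ≤ n) : 10 * Nat.fib n ≤ Nat.fib (n + 5) := by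
  obtain ⟨k, rfl⟩ : ∃ k, n = k + 2 := ⟨n - 2, by omega⟩
  have hab : Nat.fib k ≤ Nat.fib (k + 1) := Nat.fib_le_fib_succ
  have h2 : Nat.fib (k + 2) = Nat.fib k + Nat.fib (k + 1) := Nat.fib_add_two
  have h3 : Nat.fib (k + 3) = Nat.fib (k + 1) + Nat.fib (k + 2) := by
    rw [show k + 3 = (k + 1) + 2 from by omega]; exact Nat.fib_add_two
  have h4 : Nat.fib (k + 4) = Nat.fib (k + 2) + Nat.fib (k + 3) := by
    rw [show k + 4 = (k + 2) + 2 from by omega]; exact Nat.fib_add_two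
  have h5 : Nat.fib (k + 5) = Nat.fib (k + 3) + Nat.fib (k + 4) := by
    rw [show k + 5 = (k + 3) + 2 from by omega]; exact Nat.fib_add_two
  have h6 : Nat.fib (k + 6) = Nat.fib (k + 4) + Nat.fib (k + 5) := by
    rw [show k + 6 = (k + 4) + 2 from by omega]; exact Nat.fib_add_two
  have h7 : Nat.fib (k + 7) = Nat.fib (k + 5) + Nat.fib (k + 6) := by
    rw [show k + 7 = (k + 5) + 2 from by omega]; exact Nat.fib_add_two
  have : k + 2 + 5 = k + 7 := by omega
  rw [this]
  omega

theorem fib_five_mul (M : Nat) (h : 1 ≤ M) : 10 ^ (M - 1) + 1 ≤ Nat.fib (5 * M) := by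
  induction M with
  | zero => omega
  | succ M ih =>
    rcases Nat.eq_or_lt_of_le h with h1 | h1
    · rw [show M = 0 from by omega]; decide
    · have hM : 1 ≤ M := by omega
      have ihM := ih hM
      have hr : 10 * Nat.fib (5 * M) ≤ Nat.fib (5 * M + 5) := fib_ratio (5 * M) (by omega)
      have hpow : 10 ^ (M + 1 - 1) = 10 * 10 ^ (M - 1) := by
        rw [show M + 1 - 1 = (M - 1) + 1 from by omega, pow_succ]; ring
      rw [show 5 * (M + 1) = 5 * M + 5 from by omega]
      omega
theorem loopA_inv (tN N : Nat) (hNP : tN ≤ Nat.fib N) (hmin : ∀ j, j < N → Nat.fib j < tN) :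
    ∀ fuel k, 1 ≤ k → k ≤ N → N - k ≤ fuel →
    loopA fuel (tN : Int) (k : Int) ((Nat.fib k : Nat) : Int) (memoD k)
      = (((Nat.fib N : Nat) : Int), (N : Int)) := by
  intro fuel
  induction fuel with
  | zero =>
    intro k hk1 hkN hf
    have : k = N := by omega
    subst this
    rfl
  | succ fuel ih =>
    intro k hk1 hkN hf
    rw [loopA]
    by_cases hlt : ((Nat.fib k : Nat) : Int) < (tN : Int)
    · have hkltN : k < N := by
        rcases Nat.lt_or_ge k N with h | h
        · exact h
        · exfalso
          have : Nat.fib N ≤ Nat.fib k := Nat.fib_mono h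
          have : (tN : Int) ≤ ((Nat.fib k : Nat) : Int) := by exact_mod_cast le_trans hNP this
          omega
      rw [if_pos hlt]
      have e1 : ((k : Int) + 1).toNat + 2 = (k + 1) + 2 := by omega
      simp only []
      rw [e1, fibfastA_step k hk1 (k + 1)]
      have := ih (k + 1) (by omega) (by omega) (by omega)
      rw [show ((k : Int) + 1) = ((k + 1 : Nat) : Int) from by push_cast; ring]
      exact this
    · rw [if_neg hlt]
      have : N ≤ k := by
        by_contra hc
        have := hmin k (by omega)
        have : ((Nat.fib k : Nat) : Int) < (tN : Int) := by exact_mod_cast this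
        exact hlt this
      have : k = N := by omega
      subst this
      rfl

theorem loopA_start (tN N : Nat) (ht : 2 ≤ tN) (hNP : tN ≤ Nat.fib N)
    (hmin : ∀ j, j < N → Nat.fib j < tN) (fuel : Nat) (hfuel : N ≤ fuel) :
    loopA (fuel + 1) (tN : Int) 0 1 (memoD 1) = (((Nat.fib N : Nat) : Int), (N : Int)) := by
  have hN1 : 1 ≤ N := by
    by_contra hc
    have : N = 0 := by omega
    rw [this] at hNP
    simp [Nat.fib] at hNP
    omega
  rw [loopA, if_pos (by exact_mod_cast by omega : (1 : Int) < (tN : Int))]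
  have e1 : ((0 : Int) + 1).toNat + 2 = 3 := by decide
  have e0 : ((0 : Int) + 1) = ((1 : Nat) : Int) := by decide
  simp only []
  rw [e1, e0]
  have hstep : fibfastA 3 ((1 : Nat) : Int) (memoD 1) = (((Nat.fib 1 : Nat) : Int), memoD 1) := by
    rw [fibfastA, memoD_get?_le 1 1 le_rfl]
  rw [hstep]
  exact loopA_inv tN N hNP hmin fuel 1 le_rfl hN1 (by omega)
theorem fibPairB_eq (n : Nat) :
    fibPairB n = (((Nat.fib n : Nat) : Int), ((Nat.fib (n + 1) : Nat) : Int)) := by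
  induction n using Nat.strong_induction_on with
  | _ n ih =>
    rw [fibPairB]
    by_cases h0 : n = 0
    · subst h0; decide
    · rw [dif_neg h0]
      have hdiv : n / 2 < n := Nat.div_lt_self (Nat.pos_of_ne_zero h0) one_lt_two
      rw [ih (n / 2) hdiv]
      simp only []
      set q := n / 2 with hq
      have hle : Nat.fib q ≤ 2 * Nat.fib (q + 1) := by
        have := Nat.fib_le_fib_succ (n := q); omega
      have hc : ((Nat.fib q : Nat) : Int) * (2 * ((Nat.fib (q+1) : Nat) : Int) - ((Nat.fib q : Nat) : Int))
          = ((Nat.fib (2 * q) : Nat) : Int) := by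
        rw [Nat.fib_two_mul, Nat.cast_mul, Nat.cast_sub hle]
        push_cast
        ring
      have hd : ((Nat.fib q : Nat) : Int) * ((Nat.fib q : Nat) : Int)
            + ((Nat.fib (q+1) : Nat) : Int) * ((Nat.fib (q+1) : Nat) : Int)
          = ((Nat.fib (2 * q + 1) : Nat) : Int) := by
        rw [Nat.fib_two_mul_add_one]
        push_cast
        ring
      by_cases hodd : n % 2 = 1
      · rw [if_pos hodd]
        have hn : n = 2 * q + 1 := by omega
        rw [hc, hd, hn]
        have hf2 : Nat.fib (2*q+1+1) = Nat.fib (2*q) + Nat.fib (2*q+1) := Nat.fib_add_two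
        simp only [Prod.mk.injEq]
        refine ⟨by trivial, ?_⟩
        rw [hf2]
        push_cast
        ring
      · rw [if_neg hodd]
        have hn : n = 2 * q := by omega
        rw [hc, hd, hn]
theorem bsearchB_inv (tN N : Nat) (hNP : tN ≤ Nat.fib N) (hmin : ∀ j, j < N → Nat.fib j < tN) :
    ∀ fuel lo hi, Nat.fib lo < tN → tN ≤ Nat.fib hi → lo < hi → hi - lo ≤ fuel →
    bsearchB fuel (tN : Int) lo hi = N := by
  intro fuel
  induction fuel with
  | zero => intro lo hi _ _ h1 h2; omega
  | succ fuel ih =>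
    intro lo hi hlo hhi hlt hf
    rw [bsearchB]
    by_cases hw : lo + 1 < hi
    · rw [if_pos hw]
      simp only []
      rw [fibPairB_eq]
      set mid := (lo + hi) / 2 with hmid
      have hm1 : lo < mid := by omega
      have hm2 : mid < hi := by omega
      by_cases hc : ((Nat.fib mid : Nat) : Int) < (tN : Int)
      · rw [if_pos hc]
        exact ih mid hi (by exact_mod_cast hc) hhi (by omega) (by omega)
      · rw [if_neg hc]
        have : tN ≤ Nat.fib mid := by
          have : ¬ (Nat.fib mid < tN) := fun h => hc (by exact_mod_cast h)
          omega
        exact ih lo mid hlo this (by omega) (by omega)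
    · rw [if_neg hw]
      have hhe : hi = lo + 1 := by omega
      -- hi is the least index with fib ≥ tN
      have h1 : N ≤ hi := by
        by_contra hcon
        have := hmin hi (by omega)
        omega
      have h2 : lo < N := by
        by_contra hcon
        have : Nat.fib N ≤ Nat.fib lo := Nat.fib_mono (by omega)
        omega
      omega

-- ===== VERDICT (by name: the statement is the Claim_ definition above) =====
theorem fibmdigits_spec : Claim_equal_fibmdigits := by
  intro m _ hpre
  unfold Spec_fibmdigits
  have hm1 : 1 ≤ m := hpre
  set M := m.toNat with hM
  have hM1 : 1 ≤ M := by omega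
  set tN : Nat := 10 ^ (M - 1) + 1 with htN
  have ht2 : 2 ≤ tN := by
    have : 1 ≤ 10 ^ (M - 1) := Nat.one_le_pow _ _ (by omega)
    omega
  have h5 : tN ≤ Nat.fib (5 * M) := fib_five_mul M hM1
  have hex : ∃ n, tN ≤ Nat.fib n := ⟨5 * M, h5⟩
  set N := Nat.find hex with hN
  have hNP : tN ≤ Nat.fib N := Nat.find_spec hex
  have hmin : ∀ j, j < N → Nat.fib j < tN := fun j hj => by
    have := Nat.find_min hex hj
    omega
  have hN5 : N ≤ 5 * M := Nat.find_le h5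
  have hexp : (m - 1).toNat = M - 1 := by omega
  have htcast : (10 : Int) ^ (m - 1).toNat + 1 = (tN : Int) := by
    rw [hexp, htN]
    push_cast
    ring
  have hA : fibmdigits m = (((Nat.fib N : Nat) : Int), (N : Int)) := by
    unfold fibmdigits
    rw [htcast]
    have hmemo : PySem.Dict.ofList [((0 : Int), (0 : Int)), (1, 1)] = memoD 1 := by decide
    rw [hmemo, show 6 * m.toNat + 10 = (6 * M + 9) + 1 from by omega]
    exact loopA_start tN N ht2 hNP hmin (6 * M + 9) (by omega)
  have hB : fibmdigits_alt m = (((Nat.fib N : Nat) : Int), (N : Int)) := by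
    unfold fibmdigits_alt
    simp only []
    rw [htcast]
    have hbs : bsearchB (5 * m.toNat) (tN : Int) 0 (5 * m.toNat) = N :=
      bsearchB_inv tN N hNP hmin (5 * M) 0 (5 * M)
        (by rw [Nat.fib_zero]; omega) h5 (by omega) (by omega)
    rw [hbs, fibPairB_eq]
  rw [hA, hB]
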